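-- pv_equiv track=rewrite | github.com/MRCIEU/genotype-phenotype-api | app/services/studies_service.py | _replace_first_two_dashes_with_underscores
-- ===== SOURCE A (Python) =====
-- def _replace_first_two_dashes_with_underscores(x: str):
--     if not x:
--         return x
--     dash_positions = [i for i, char in enumerate(x) if char == "-"]
--
--     if len(dash_positions) <= 2:
--         return x
--
--     # Keep the first two dashes, replace the rest with '_'
--     result = list(x)
--     for i in range(2, len(dash_positions)):
--         pos = dash_positions[i]
--         result[pos] = "_"
--
--     return "".join(result)
-- ===== SOURCE B (Python) =====
-- def _replace_first_two_dashes_with_underscores(x: str):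
--     out = []
--     seen = 0
--     for ch in x:
--         if ch == "-":
--             out.append("_" if seen >= 2 else ch)
--             seen += 1
--         else:
--             out.append(ch)
--     return "".join(out)
-- ===== Notes on version B (the rewrite author's own statement) =====
-- stated objective: simpler
-- what changed: Replaced the three-pass position-list-then-mutate approach (collect dash indices, guard on their count, rewrite a char list at indices 2..) by a single pass over the characters with a running dash counter that emits an underscore from the third dash on.
import Mathlib
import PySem

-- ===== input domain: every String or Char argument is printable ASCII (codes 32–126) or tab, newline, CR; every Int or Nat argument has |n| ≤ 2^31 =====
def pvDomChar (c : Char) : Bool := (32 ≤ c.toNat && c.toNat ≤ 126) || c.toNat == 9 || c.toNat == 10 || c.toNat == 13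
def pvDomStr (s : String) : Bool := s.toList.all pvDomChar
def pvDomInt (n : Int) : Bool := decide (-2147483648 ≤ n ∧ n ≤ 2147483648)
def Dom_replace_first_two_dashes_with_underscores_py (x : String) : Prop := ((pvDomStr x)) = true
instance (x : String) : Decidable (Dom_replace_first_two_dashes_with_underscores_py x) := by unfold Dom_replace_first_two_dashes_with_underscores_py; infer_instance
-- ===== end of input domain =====

-- B replaces A's three passes (collect dash indices, count guard, mutate at indices 2..)
-- by one pass with a running dash counter; objective: simpler.

-- ===== PORT A =====
def replace_first_two_dashes_with_underscores_py (x : String) : String :=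
  if x = "" then x
  else
    let dash_positions : List Int :=
      ((PySem.List.enumerate x.toList 0).filter (fun p => p.2 == '-')).map (·.1)
    if PySem.List.len dash_positions ≤ 2 then x
    else
      let result := x.toList
      let result :=
        (PySem.List.pyRange 2 (PySem.List.len dash_positions) 1).foldl
          (fun r i =>
            let pos := PySem.List.pyGetD dash_positions i 0
            PySem.List.pySetD r pos '_') result
      String.ofList result

-- ===== PORT B =====
def pvAltGo : List Char → Nat → List Char
  | [], _ => []
  | c :: cs, seen =>
    if c = '-' then (if 2 ≤ seen then '_' else c) :: pvAltGo cs (seen + 1)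
    else c :: pvAltGo cs seen

def replace_first_two_dashes_with_underscores_py_alt (x : String) : String :=
  String.ofList (pvAltGo x.toList 0)

-- ===== PRECONDITION & SPEC =====
def Spec_replace_first_two_dashes_with_underscores_py (x : String) (out : String) : Prop := out = replace_first_two_dashes_with_underscores_py_alt x
instance (x : String) (out : String) : Decidable (Spec_replace_first_two_dashes_with_underscores_py x out) := by unfold Spec_replace_first_two_dashes_with_underscores_py; infer_instance

-- ===== CLAIM (what is proved, stated in full; the proofs are below) =====
def Claim_equal_replace_first_two_dashes_with_underscores_py : Prop := ∀ (x : String), Dom_replace_first_two_dashes_with_underscores_py x → Spec_replace_first_two_dashes_with_underscores_py x (replace_first_two_dashes_with_underscores_py x)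

-- ===== LEMMAS AND PROOFS =====

-- dash positions of a char list, as naturals, built structurally
def pvNpos : List Char → List Nat
  | [] => []
  | c :: cs => if c = '-' then 0 :: (pvNpos cs).map (· + 1) else (pvNpos cs).map (· + 1)

-- A's mutation loop, over natural indices
def pvApp (l : List Char) (qs : List Nat) : List Char :=
  qs.foldl (fun r q => r.set q '_') l

lemma pvEnum_eq (l : List Char) (s : Int) :
    ((PySem.List.enumerate l s).filter (fun p => p.2 == '-')).map (·.1)
      = (pvNpos l).map (fun n : Nat => s + (n : Int)) := by
  induction l generalizing s with
  | nil => rfl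
  | cons c cs ih =>
    rw [PySem.List.enumerate_cons, List.filter_cons]
    by_cases hc : c = '-'
    · rw [if_pos (by simpa using hc), List.map_cons, ih (s + 1)]
      simp only [pvNpos, if_pos hc, List.map_cons, List.map_map]
      refine congrArg₂ List.cons (by push_cast; ring) ?_
      refine List.map_congr_left fun a _ => ?_
      simp only [Function.comp_apply]
      push_cast; ring
    · rw [if_neg (by simpa using hc), ih (s + 1)]
      simp only [pvNpos, if_neg hc, List.map_map]
      refine List.map_congr_left fun a _ => ?_
      simp only [Function.comp_apply]
      push_cast; ring

lemma pvEnum0 (l : List Char) :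
    ((PySem.List.enumerate l 0).filter (fun p => p.2 == '-')).map (·.1)
      = (pvNpos l).map (fun n : Nat => (n : Int)) := by
  rw [pvEnum_eq]
  exact List.map_congr_left fun a _ => by ring

lemma pvApp_shift (qs : List Nat) (c : Char) (cs : List Char) :
    pvApp (c :: cs) (qs.map (· + 1)) = c :: pvApp cs qs := by
  induction qs generalizing cs with
  | nil => rfl
  | cons q qs ih =>
    simp only [pvApp, List.map_cons, List.foldl_cons, List.set_cons_succ]
    exact ih (cs.set q '_')

lemma pvGo_eq_app (l : List Char) (k : Nat) :
    pvAltGo l k = pvApp l (List.drop (2 - k) (pvNpos l)) := by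
  induction l generalizing k with
  | nil => simp [pvAltGo, pvApp, pvNpos]
  | cons c cs ih =>
    by_cases hc : c = '-'
    · simp only [pvAltGo, pvNpos, if_pos hc]
      by_cases hk : 2 ≤ k
      · rw [if_pos hk, show 2 - k = 0 from by omega, List.drop_zero]
        have h : pvApp (c :: cs) (0 :: (pvNpos cs).map (· + 1))
            = '_' :: pvApp cs (pvNpos cs) := by
          show pvApp ((c :: cs).set 0 '_') ((pvNpos cs).map (· + 1)) = _
          exact pvApp_shift _ _ _
        rw [h, ih (k + 1), show 2 - (k + 1) = 0 from by omega, List.drop_zero]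
      · rw [if_neg hk, show 2 - k = (2 - (k + 1)) + 1 from by omega,
          List.drop_succ_cons, ← List.map_drop, pvApp_shift, ih (k + 1)]
    · simp only [pvAltGo, pvNpos, if_neg hc]
      rw [← List.map_drop, pvApp_shift, ih k]

-- ===== VERDICT (by name: the statement is the Claim_ definition above) =====
theorem replace_first_two_dashes_with_underscores_py_spec : Claim_equal_replace_first_two_dashes_with_underscores_py := by
  intro x _
  show replace_first_two_dashes_with_underscores_py x = replace_first_two_dashes_with_underscores_py_alt x
  unfold replace_first_two_dashes_with_underscores_py replace_first_two_dashes_with_underscores_py_alt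
  by_cases hx : x = ""
  · subst hx; rfl
  · rw [if_neg hx]
    show (if PySem.List.len (((PySem.List.enumerate x.toList 0).filter (fun p => p.2 == '-')).map (·.1)) ≤ 2 then x
      else String.ofList
        ((PySem.List.pyRange 2 (PySem.List.len (((PySem.List.enumerate x.toList 0).filter (fun p => p.2 == '-')).map (·.1))) 1).foldl
          (fun r i => PySem.List.pySetD r
            (PySem.List.pyGetD (((PySem.List.enumerate x.toList 0).filter (fun p => p.2 == '-')).map (·.1)) i 0) '_')
          x.toList)) = String.ofList (pvAltGo x.toList 0)
    rw [pvEnum0 x.toList]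
    by_cases hlen : PySem.List.len ((pvNpos x.toList).map (fun n : Nat => (n : Int))) ≤ 2
    · rw [if_pos hlen]
      have hnp : (pvNpos x.toList).length ≤ 2 := by
        rw [PySem.List.len_eq, List.length_map] at hlen
        exact_mod_cast hlen
      have hdrop : List.drop (2 - 0) (pvNpos x.toList) = [] :=
        List.drop_eq_nil_iff.mpr (by omega)
      rw [pvGo_eq_app, hdrop]
      exact (String.ofList_toList (s := x)).symm
    · rw [if_neg hlen]
      have hfold := PySem.List.foldl_pyRange_pyGetD
        (xs := (pvNpos x.toList).map (fun n : Nat => (n : Int))) (d := 0)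
        (f := fun r p => PySem.List.pySetD r p '_') (init := x.toList)
        (a := 2) (by norm_num)
      rw [hfold, show ((2 : Int)).toNat = 2 from rfl, ← List.map_drop, List.foldl_map]
      have hcongr := PySem.List.foldl_congr_mem
        (l := List.drop 2 (pvNpos x.toList)) (init := x.toList)
        (f := fun r q => PySem.List.pySetD r ((q : Nat) : Int) '_')
        (g := fun r q => r.set q '_')
        (fun acc q _ => PySem.List.pySetD_natCast acc q '_')
      rw [hcongr, pvGo_eq_app]
      rfl
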